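-- pv_equiv track=rewrite | github.com/andics/object_reps_neural | detr/EXPERIMENTS/generate_detection_videos_and_meshes/main_gen_vids_and_meshed_DEBUG.py | make_masks_disjoint
-- ===== SOURCE A (Python) =====
-- def make_masks_disjoint(masks):
--     """
--     Remove overlap among a list of boolean masks in-place.
--     """
--     for i in range(len(masks)):
--         if masks[i] is None:
--             continue
--         for j in range(i+1, len(masks)):
--             if masks[j] is None:
--                 continue
--             masks[j] = masks[j] & ~masks[i]
--     return masks
-- ===== SOURCE B (Python) =====
-- def make_masks_disjoint(masks):
--     """
--     Remove overlap among a list of boolean masks in-place.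
--     Single pass: keep a running union of everything already kept and
--     subtract it from each subsequent mask.
--     """
--     union = 0
--     for k, m in enumerate(masks):
--         if m is not None:
--             d = m & ~union
--             masks[k] = d
--             union |= d
--     return masks
-- ===== Notes on version B (the rewrite author's own statement) =====
-- stated objective: faster
-- what changed: Replaces the quadratic pairwise subtraction (each earlier mask subtracted from every later mask) by a single pass that maintains a running union of the masks kept so far and subtracts it once from each mask.
import Mathlib
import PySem

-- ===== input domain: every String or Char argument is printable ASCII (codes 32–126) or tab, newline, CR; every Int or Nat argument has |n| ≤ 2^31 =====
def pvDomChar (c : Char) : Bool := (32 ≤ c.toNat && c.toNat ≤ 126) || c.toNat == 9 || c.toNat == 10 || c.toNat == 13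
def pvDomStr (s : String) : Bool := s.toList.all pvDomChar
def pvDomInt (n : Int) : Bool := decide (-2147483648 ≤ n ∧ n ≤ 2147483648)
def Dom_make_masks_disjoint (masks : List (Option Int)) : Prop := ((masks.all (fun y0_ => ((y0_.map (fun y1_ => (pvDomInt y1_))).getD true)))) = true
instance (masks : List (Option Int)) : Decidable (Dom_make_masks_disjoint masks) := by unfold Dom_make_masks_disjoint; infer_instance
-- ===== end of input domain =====

-- B replaces A's quadratic pairwise subtraction by a single pass with a running
-- union mask (objective: faster, asymptotically). A mutates the list in place and
-- returns it; B performs the same in-place updates; the equivalence proved here is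
-- about the returned value.

-- ===== PORT A =====
-- one inner-loop body: masks[j] = masks[j] & ~masks[i]  (skipped when either is None)
def pvAStep (masks : List (Option Int)) (i j : Nat) : List (Option Int) :=
  match masks.getD j none, masks.getD i none with
  | some mj, some mi => masks.set j (some (PySem.Int.band mj (Int.not mi)))
  | _, _ => masks

-- for j in range(i+1, len(masks)):  (n = number of remaining iterations)
def pvAInner (i : Nat) : Nat → Nat → List (Option Int) → List (Option Int)
  | 0, _, masks => masks
  | n+1, j, masks => pvAInner i n (j+1) (pvAStep masks i j)

-- for i in range(len(masks)):  (n = number of remaining iterations)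
def pvAOuter : Nat → Nat → List (Option Int) → List (Option Int)
  | 0, _, masks => masks
  | n+1, i, masks =>
    match masks.getD i none with
    | none => pvAOuter n (i+1) masks
    | some _ => pvAOuter n (i+1) (pvAInner i (masks.length - (i+1)) (i+1) masks)

def make_masks_disjoint (masks : List (Option Int)) : List (Option Int) :=
  pvAOuter masks.length 0 masks

-- ===== PORT B =====
-- the single pass: u is the running union, each kept mask is m & ~u
def pvBGo (u : Int) : List (Option Int) → List (Option Int)
  | [] => []
  | none :: t => none :: pvBGo u t
  | some m :: t =>
    let d := PySem.Int.band m (Int.not u)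
    some d :: pvBGo (PySem.Int.bor u d) t

def make_masks_disjoint_alt (masks : List (Option Int)) : List (Option Int) :=
  pvBGo 0 masks

-- ===== PRECONDITION & SPEC =====
def Spec_make_masks_disjoint (masks : List (Option Int)) (out : List (Option Int)) : Prop := out = make_masks_disjoint_alt masks
instance (masks : List (Option Int)) (out : List (Option Int)) : Decidable (Spec_make_masks_disjoint masks out) := by unfold Spec_make_masks_disjoint; infer_instance

-- ===== CLAIM (what is proved, stated in full; the proofs are below) =====
def Claim_equal_make_masks_disjoint : Prop := ∀ (masks : List (Option Int)), Dom_make_masks_disjoint masks → Spec_make_masks_disjoint masks (make_masks_disjoint masks)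

-- ===== LEMMAS AND PROOFS =====

-- (m AND n) + (m AND NOT n) = m on Nat
theorem pv_and_add_ldiff (m : Nat) : ∀ n : Nat, (m &&& n) + Nat.ldiff m n = m := by
  induction m using Nat.binaryRec with
  | zero => intro n; simp [Nat.zero_and, Nat.ldiff]
  | bit b m ih =>
    intro n
    rw [← Nat.bit_testBit_zero_shiftRight_one n, Nat.land_bit, Nat.ldiff_bit]
    have := ih (n >>> 1)
    cases b <;> cases n.testBit 0 <;>
      simp [Nat.bit] at * <;> omega

theorem pv_sub_and_eq_ldiff (m n : Nat) : m - (m &&& n) = Nat.ldiff m n := by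
  have := pv_and_add_ldiff m n; omega

theorem pv_band_eq_land (a b : Int) : PySem.Int.band a b = Int.land a b := by
  cases a with
  | ofNat m =>
    cases b with
    | ofNat n =>
      have hl : Int.land (Int.ofNat m) (Int.ofNat n) = ((m &&& n : Nat) : Int) := rfl
      rw [hl]; show PySem.Int.band (m:Int) (n:Int) = _
      simp only [PySem.Int.band]
      split_ifs with h1 h2 <;> try omega
      simp
    | negSucc n =>
      have hl : Int.land (Int.ofNat m) (Int.negSucc n) = ((Nat.ldiff m n : Nat) : Int) := rfl
      rw [hl]; show PySem.Int.band (m:Int) (Int.negSucc n) = _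
      rw [Int.negSucc_eq]
      simp only [PySem.Int.band]
      split_ifs with h1 h2 <;> try omega
      have e : (-(-((n:Int) + 1)) - 1).toNat = n := by omega
      have e2 : ((m:Int)).toNat = m := by omega
      rw [e, e2, pv_sub_and_eq_ldiff]
  | negSucc m =>
    cases b with
    | ofNat n =>
      have hl : Int.land (Int.negSucc m) (Int.ofNat n) = ((Nat.ldiff n m : Nat) : Int) := rfl
      rw [hl]; show PySem.Int.band (Int.negSucc m) (n:Int) = _
      rw [Int.negSucc_eq]
      simp only [PySem.Int.band]
      split_ifs with h1 h2 <;> try omega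
      have e : (-(-((m:Int) + 1)) - 1).toNat = m := by omega
      have e2 : ((n:Int)).toNat = n := by omega
      rw [e, e2, pv_sub_and_eq_ldiff]
    | negSucc n =>
      have hl : Int.land (Int.negSucc m) (Int.negSucc n) = Int.negSucc (m ||| n) := rfl
      rw [hl]; show PySem.Int.band (Int.negSucc m) (Int.negSucc n) = _
      rw [Int.negSucc_eq, Int.negSucc_eq, Int.negSucc_eq]
      simp only [PySem.Int.band]
      split_ifs with h1 h2 <;> try omega
      have e : (-(-((m:Int) + 1)) - 1).toNat = m := by omega
      have e2 : (-(-((n:Int) + 1)) - 1).toNat = n := by omega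
      rw [e, e2]; ring
theorem pv_bor_eq_lor (a b : Int) : PySem.Int.bor a b = Int.lor a b := by
  cases a with
  | ofNat m =>
    cases b with
    | ofNat n =>
      have hl : Int.lor (Int.ofNat m) (Int.ofNat n) = ((m ||| n : Nat) : Int) := rfl
      rw [hl]; show PySem.Int.bor (m:Int) (n:Int) = _
      simp only [PySem.Int.bor]
      split_ifs with h1 h2 <;> try omega
      simp
    | negSucc n =>
      have hl : Int.lor (Int.ofNat m) (Int.negSucc n) = Int.negSucc (Nat.ldiff n m) := rfl
      rw [hl]; show PySem.Int.bor (m:Int) (Int.negSucc n) = _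
      rw [Int.negSucc_eq, Int.negSucc_eq]
      simp only [PySem.Int.bor]
      split_ifs with h1 h2 <;> try omega
      have e : (-(-((n:Int) + 1)) - 1).toNat = n := by omega
      have e2 : ((m:Int)).toNat = m := by omega
      rw [e, e2, pv_sub_and_eq_ldiff]; ring_nf
  | negSucc m =>
    cases b with
    | ofNat n =>
      have hl : Int.lor (Int.negSucc m) (Int.ofNat n) = Int.negSucc (Nat.ldiff m n) := rfl
      rw [hl]; show PySem.Int.bor (Int.negSucc m) (n:Int) = _
      rw [Int.negSucc_eq, Int.negSucc_eq]
      simp only [PySem.Int.bor]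
      split_ifs with h1 h2 <;> try omega
      have e : (-(-((m:Int) + 1)) - 1).toNat = m := by omega
      have e2 : ((n:Int)).toNat = n := by omega
      rw [e, e2, pv_sub_and_eq_ldiff]; ring_nf
    | negSucc n =>
      have hl : Int.lor (Int.negSucc m) (Int.negSucc n) = Int.negSucc (m &&& n) := rfl
      rw [hl]; show PySem.Int.bor (Int.negSucc m) (Int.negSucc n) = _
      rw [Int.negSucc_eq, Int.negSucc_eq, Int.negSucc_eq]
      simp only [PySem.Int.bor]
      split_ifs with h1 h2 <;> try omega
      have e : (-(-((m:Int) + 1)) - 1).toNat = m := by omega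
      have e2 : (-(-((n:Int) + 1)) - 1).toNat = n := by omega
      rw [e, e2]; ring
theorem pv_mixed {m n k : Nat} (hk : k = m + n) (h : Int.testBit (Int.ofNat m) k = Int.testBit (Int.negSucc n) k) : False := by
  subst hk
  have hm : m < 2 ^ (m + n) := lt_of_lt_of_le (Nat.lt_two_pow_self) (Nat.pow_le_pow_right (by norm_num) (Nat.le_add_right _ _))
  have hn : n < 2 ^ (m + n) := lt_of_lt_of_le (Nat.lt_two_pow_self) (Nat.pow_le_pow_right (by norm_num) (Nat.le_add_left _ _))
  simp only [Int.testBit] at h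
  rw [Nat.testBit_eq_false_of_lt hm, Nat.testBit_eq_false_of_lt hn] at h
  simp at h
theorem pv_int_ext {a b : Int} (h : ∀ k, a.testBit k = b.testBit k) : a = b := by
  cases a with
  | ofNat m =>
    cases b with
    | ofNat n =>
      have : m = n := by
        apply Nat.eq_of_testBit_eq
        intro k
        have := h k
        simpa [Int.testBit] using this
      simp [this]
    | negSucc n => exact absurd (h (m + n)) (fun hh => pv_mixed rfl hh)
  | negSucc m =>
    cases b with
    | ofNat n => exact absurd ((h (n + m)).symm) (fun hh => pv_mixed (by omega) hh)
    | negSucc n =>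
      have : m = n := by
        apply Nat.eq_of_testBit_eq
        intro k
        have := h k
        simp only [Int.testBit] at this
        simpa using this
      simp [this]
theorem pv_not_eq_lnot (a : Int) : Int.not a = Int.lnot a := by
  cases a <;> rfl

-- x & ~0 = x
theorem pv_band_not_zero (m : Int) : PySem.Int.band m (Int.not 0) = m := by
  have : Int.not 0 = -1 := rfl
  rw [this, PySem.Int.band_neg_one]

-- 0 | x = x
theorem pv_bor_zero_left (m : Int) : PySem.Int.bor 0 m = m := by
  rw [PySem.Int.bor_comm, PySem.Int.bor_zero]

-- (m & ~a) & ~v = m & ~(v | a)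
theorem pv_subtract_subtract (m a v : Int) :
    PySem.Int.band (PySem.Int.band m (Int.not a)) (Int.not v)
      = PySem.Int.band m (Int.not (PySem.Int.bor v a)) := by
  simp only [pv_band_eq_land, pv_bor_eq_lor, pv_not_eq_lnot]
  apply pv_int_ext
  intro k
  simp only [Int.testBit_land, Int.testBit_lnot, Int.testBit_lor]
  cases m.testBit k <;> cases a.testBit k <;> cases v.testBit k <;> rfl

-- (v | d) | a = (v | a) | d
theorem pv_bor_rot (v d a : Int) :
    PySem.Int.bor (PySem.Int.bor v d) a = PySem.Int.bor (PySem.Int.bor v a) d := by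
  simp only [pv_bor_eq_lor]
  apply pv_int_ext
  intro k
  simp only [Int.testBit_lor]
  cases v.testBit k <;> cases d.testBit k <;> cases a.testBit k <;> rfl

-- subtracting a first, then running B, equals running B with a merged into the union
theorem pv_go_map (a : Int) : ∀ (t : List (Option Int)) (v : Int),
    pvBGo v (t.map (Option.map (fun m => PySem.Int.band m (Int.not a)))) = pvBGo (PySem.Int.bor v a) t := by
  intro t
  induction t with
  | nil => intro v; rfl
  | cons h t ih =>
    intro v
    cases h with
    | none => simp [pvBGo, ih]
    | some m =>
      simp only [List.map_cons, Option.map_some, pvBGo, pv_subtract_subtract, ih]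
      rw [pv_bor_rot]


theorem pv_inner_eq (i : Nat) (a : Int) :
    ∀ (n j : Nat) (L : List (Option Int)), i < j → L.getD i none = some a → L.length ≤ j + n →
      pvAInner i n j L = L.take j ++ (L.drop j).map (Option.map (fun m => PySem.Int.band m (Int.not a))) := by
  intro n
  induction n with
  | zero =>
    intro j L hij hi hlen
    rw [pvAInner, List.take_of_length_le (by omega), List.drop_eq_nil_of_le (by omega)]
    simp
  | succ n ih =>
    intro j L hij hi hlen
    rw [pvAInner]
    unfold pvAStep
    rw [hi]
    cases hj : L.getD j none with
    | none =>
      rw [ih (j+1) L (by omega) hi (by omega)]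
      by_cases hjl : j < L.length
      · have hLj : L[j] = none := by
          have : L.getD j none = L[j] := List.getD_eq_getElem L none hjl
          rw [hj] at this; exact this.symm
        rw [List.take_add_one, List.drop_eq_getElem_cons hjl, List.map_cons, hLj]
        simp [List.getElem?_eq_getElem hjl, hLj]
      · have h1 : L.length ≤ j := by omega
        rw [List.take_of_length_le h1, List.take_of_length_le (by omega),
            List.drop_eq_nil_of_le h1, List.drop_eq_nil_of_le (by omega)]
    | some mj =>
      have hjl : j < L.length := by
        by_contra hc
        rw [List.getD_eq_default _ _ (by omega)] at hj
        simp at hj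
      have hLj : L[j] = some mj := by
        have : L.getD j none = L[j] := List.getD_eq_getElem L none hjl
        rw [hj] at this; exact this.symm
      set x : Option Int := some (PySem.Int.band mj (Int.not a)) with hx
      have hset : L.set j x = L.take j ++ x :: L.drop (j+1) := by rw [List.set_eq_take_append_cons_drop, if_pos hjl]
      have hi' : (L.set j x).getD i none = some a := by
        rw [List.getD_eq_getElem?_getD, List.getElem?_set_ne (by omega), ← List.getD_eq_getElem?_getD, hi]
      have hjj : (L.take j).length = j := by simp; omega
      rw [ih (j+1) (L.set j x) (by omega) hi' (by simp only [List.length_set]; omega), hset,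
          List.take_append, List.drop_append, hjj]
      have e1 : j + 1 - j = 1 := by omega
      have e2 : List.take (j+1) (L.take j) = L.take j := List.take_of_length_le (by omega)
      have e3 : List.drop (j+1) (L.take j) = [] := List.drop_eq_nil_of_le (by omega)
      have e4 : List.take 1 (x :: List.drop (j+1) L) = [x] := by simp
      have e5 : List.drop 1 (x :: List.drop (j+1) L) = List.drop (j+1) L := rfl
      rw [e1, e2, e3, e4, e5]
      rw [List.drop_eq_getElem_cons hjl, List.map_cons, hLj]
      simp [hx]
theorem pv_outer_eq :
    ∀ (n i : Nat) (L : List (Option Int)), L.length ≤ i + n →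
      pvAOuter n i L = L.take i ++ pvBGo 0 (L.drop i) := by
  intro n
  induction n with
  | zero =>
    intro i L hlen
    rw [pvAOuter, List.take_of_length_le (by omega), List.drop_eq_nil_of_le (by omega)]
    simp [pvBGo]
  | succ n ih =>
    intro i L hlen
    rw [pvAOuter]
    cases hi : L.getD i none with
    | none =>
      rw [ih (i+1) L (by omega)]
      by_cases hil : i < L.length
      · have hLi : L[i] = none := by
          have : L.getD i none = L[i] := List.getD_eq_getElem L none hil
          rw [hi] at this; exact this.symm
        rw [List.take_add_one, List.drop_eq_getElem_cons hil, hLi, pvBGo]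
        simp [List.getElem?_eq_getElem hil, hLi]
      · have h1 : L.length ≤ i := by omega
        rw [List.take_of_length_le h1, List.take_of_length_le (by omega),
            List.drop_eq_nil_of_le h1, List.drop_eq_nil_of_le (by omega)]
    | some mi =>
      have hil : i < L.length := by
        by_contra hc
        rw [List.getD_eq_default _ _ (by omega)] at hi
        simp at hi
      have hLi : L[i] = some mi := by
        have : L.getD i none = L[i] := List.getD_eq_getElem L none hil
        rw [hi] at this; exact this.symm
      rw [pv_inner_eq i mi (L.length - (i+1)) (i+1) L (by omega) hi (by omega)]
      set f : Option Int → Option Int := Option.map (fun m => PySem.Int.band m (Int.not mi)) with hf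
      set L' := L.take (i+1) ++ (L.drop (i+1)).map f with hL'
      have hlen' : L'.length = L.length := by simp [hL']; omega
      rw [ih (i+1) L' (by omega)]
      have htk : L'.take (i+1) = L.take (i+1) := by
        rw [hL', List.take_append, List.take_of_length_le (by simp)]
        simp; omega
      have hdr : L'.drop (i+1) = (L.drop (i+1)).map f := by
        rw [hL', List.drop_append]
        have : (L.take (i+1)).length = i+1 := by simp; omega
        simp [this]
      rw [htk, hdr, hf, pv_go_map mi (L.drop (i+1)) 0]
      rw [List.take_add_one, List.drop_eq_getElem_cons hil, hLi, pvBGo]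
      simp only [List.getElem?_eq_getElem hil, hLi]
      rw [pv_band_not_zero, pv_bor_zero_left]
      simp

-- ===== VERDICT (by name: the statement is the Claim_ definition above) =====
theorem make_masks_disjoint_spec : Claim_equal_make_masks_disjoint := by
  intro masks _
  unfold Spec_make_masks_disjoint make_masks_disjoint make_masks_disjoint_alt
  rw [pv_outer_eq masks.length 0 masks (by omega)]
  simp
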